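-- pv_equiv track=rewrite | github.com/alkaosar-ck/CodeForces-Problems-Solution-Python- | CodeForces-1881A.py | check
-- ===== SOURCE A (Python) =====
-- def check(a,b,r):
--    if b in a :
--       return 0
--    else:
--       for x in range(r):
--          a+=a
--          if b in a:
--             return x+1
--       return -1
-- ===== SOURCE B (Python) =====
-- def check(a, b, r):
--     if b in a:
--         return 0
--     if not a:
--         return -1
--     copies = len(b) // len(a) + 2
--     m = next((m for m in range(2, copies + 1) if b in a * m), None)
--     if m is None:
--         return -1
--     k = (m - 1).bit_length()
--     return k if k <= r else -1
-- ===== Notes on version B (the rewrite author's own statement) =====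
-- stated objective: faster
-- what changed: Instead of A's loop that doubles the string up to r times and rescans each exponentially growing copy, B finds the minimal number m of copies of a containing b by one scan over at most len(b)//len(a)+2 linearly growing repetitions and computes the answer arithmetically as (m-1).bit_length() capped by r; intended as asymptotically faster: a timing run could not confirm a ratio because A timed out (at n=64 and above) on inputs where B returned, and at the only size both finished B read 2.1x below the 5 ms measurability floor.
import Mathlib
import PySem

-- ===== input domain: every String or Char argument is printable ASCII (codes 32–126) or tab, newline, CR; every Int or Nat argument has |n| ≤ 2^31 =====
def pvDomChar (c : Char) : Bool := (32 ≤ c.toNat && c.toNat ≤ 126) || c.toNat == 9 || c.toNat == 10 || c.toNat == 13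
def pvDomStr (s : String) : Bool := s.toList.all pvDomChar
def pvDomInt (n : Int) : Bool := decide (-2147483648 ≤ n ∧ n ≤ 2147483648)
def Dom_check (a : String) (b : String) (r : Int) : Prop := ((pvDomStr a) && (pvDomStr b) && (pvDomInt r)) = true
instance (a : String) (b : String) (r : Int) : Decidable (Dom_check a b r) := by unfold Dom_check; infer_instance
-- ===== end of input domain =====

-- B replaces A's exponential doubling-and-rescan loop by one linear scan for the minimal number of
-- copies of `a` containing `b`, from which the doubling count is computed arithmetically (bit_length).

-- ===== PORT A =====
-- the for-loop: `for x in range(r): a += a; if b in a: return x+1` / `return -1` after the loop.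
-- The growing string is carried as its List Char (PySem.Str.isIn b s = PySem.Chars.isIn b.toList s.toList).
def checkLoop (b : String) : List Int → List Char → Int
  | [], _ => -1
  | x :: xs, s =>
    let s2 := s ++ s
    if PySem.Chars.isIn b.toList s2 then x + 1 else checkLoop b xs s2

def check (a : String) (b : String) (r : Int) : Int :=
  if PySem.Str.isIn b a then 0
  else checkLoop b (PySem.List.pyRange 0 r 1) a.toList

-- ===== PORT B =====
-- `next((m for m in range(2, copies+1) if b in a*m), None)`
def findRep (a : String) (b : String) : List Int → Option Int
  | [] => none
  | m :: ms =>
    if PySem.Chars.isIn b.toList (PySem.List.pyRepeat a.toList m) then some m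
    else findRep a b ms

def check_alt (a : String) (b : String) (r : Int) : Int :=
  if PySem.Str.isIn b a then 0
  else if PySem.Str.len a = 0 then -1
  else
    let copies : Int := PySem.Int.floordiv (PySem.Str.len b) (PySem.Str.len a) + 2
    match findRep a b (PySem.List.pyRange 2 (copies + 1) 1) with
    | none => -1
    | some m =>
      let k : Int := (PySem.Int.bitLength (m - 1) : Int)
      if k ≤ r then k else -1

-- ===== PRECONDITION & SPEC =====
def Spec_check (a : String) (b : String) (r : Int) (out : Int) : Prop := out = check_alt a b r
instance (a : String) (b : String) (r : Int) (out : Int) : Decidable (Spec_check a b r out) := by unfold Spec_check; infer_instance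

-- ===== CLAIM (what is proved, stated in full; the proofs are below) =====
def Claim_equal_check : Prop := ∀ (a : String) (b : String) (r : Int), Dom_check a b r → Spec_check a b r (check a b r)

-- ===== LEMMAS AND PROOFS =====

-- `a` repeated n times (PySem.List.pyRepeat xs m = nrep xs m.toNat by definition)
def nrep (A : List Char) (n : Nat) : List Char := (List.replicate n A).flatten

theorem nrep_zero (A : List Char) : nrep A 0 = [] := rfl

theorem nrep_one (A : List Char) : nrep A 1 = A := by simp [nrep]

theorem nrep_add (A : List Char) (m n : Nat) : nrep A (m + n) = nrep A m ++ nrep A n := by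
  unfold nrep; rw [List.replicate_add, List.flatten_append]

theorem length_nrep (A : List Char) (n : Nat) : (nrep A n).length = n * A.length := by
  simp [nrep]

theorem nrep_mono {A B : List Char} {m n : Nat} (h : m ≤ n) (hB : B <:+: nrep A m) :
    B <:+: nrep A n := by
  have : nrep A n = nrep A m ++ nrep A (n - m) := by
    rw [← nrep_add]; congr 1; omega
  rw [this]; exact List.infix_append_of_infix_left hB

-- an occurrence anywhere can be shifted to an occurrence at offset < |A|
theorem occ_small {A B : List Char} (hA : A ≠ []) :
    ∀ (n p : Nat), B <+: (nrep A n).drop p → ∃ n' p', p' < A.length ∧ B <+: (nrep A n').drop p' := by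
  intro n
  induction n with
  | zero =>
    intro p h
    simp [nrep_zero] at h
    exact ⟨0, 0, by cases A <;> simp_all, by simp [h]⟩
  | succ n ih =>
    intro p h
    by_cases hp : p < A.length
    · exact ⟨n + 1, p, hp, h⟩
    · have hrep : nrep A (n + 1) = A ++ nrep A n := by
        rw [Nat.add_comm, nrep_add, nrep_one]
      rw [hrep, List.drop_append, List.drop_eq_nil_of_le (by omega), List.nil_append] at h
      exact ih (p - A.length) h

-- if b occurs in some number of copies, it occurs in |B|/|A| + 2 copies
theorem occ_bound {A B : List Char} (hA : A ≠ []) {n : Nat} (h : B <:+: nrep A n) :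
    B <:+: nrep A (B.length / A.length + 2) := by
  set c : Nat := B.length / A.length + 2 with hc
  have h0 : 0 < A.length := List.length_pos_iff.mpr hA
  -- extract an occurrence position
  have hIn : PySem.Chars.isIn B (nrep A n) = true := (PySem.Chars.isIn_iff_infix _ _).mpr h
  obtain ⟨p, hp⟩ := (PySem.Chars.exists_prefix_drop_iff_isIn B (nrep A n)).mpr hIn
  obtain ⟨n', p', hp', hocc⟩ := occ_small hA n p hp
  -- B fits inside the first c copies when it starts at p' < |A|
  have hfit : p' + B.length ≤ c * A.length := by
    have h2 := Nat.div_add_mod B.length A.length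
    have h1 : B.length % A.length < A.length := Nat.mod_lt _ h0
    have h3 : c * A.length = A.length * (B.length / A.length) + 2 * A.length := by rw [hc]; ring
    rw [h3]
    generalize A.length * (B.length / A.length) = t at h2 ⊢
    omega
  set N : Nat := max n' c with hN
  have hpre1 : nrep A n' <+: nrep A N := by
    have : nrep A N = nrep A n' ++ nrep A (N - n') := by rw [← nrep_add]; congr 1; omega
    rw [this]; exact List.prefix_append _ _
  have hpre2 : nrep A c <+: nrep A N := by
    have : nrep A N = nrep A c ++ nrep A (N - c) := by rw [← nrep_add]; congr 1; omega
    rw [this]; exact List.prefix_append _ _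
  have hoccN : B <+: (nrep A N).drop p' := hocc.trans (hpre1.drop p')
  have hlen : B.length ≤ ((nrep A c).drop p').length := by
    rw [List.length_drop, length_nrep]; omega
  have : B <+: (nrep A c).drop p' :=
    List.prefix_of_prefix_length_le hoccN (hpre2.drop p') hlen
  exact this.isInfix.trans ((List.drop_suffix p' (nrep A c)).isInfix)

-- doubling: s ++ s for s = nrep A t
theorem nrep_double (A : List Char) (t : Nat) : nrep A t ++ nrep A t = nrep A (2 * t) := by
  rw [Nat.two_mul, nrep_add]

-- A's loop never finds b if no number of copies contains it
theorem checkLoop_never {a b : String} (hnone : ∀ n, ¬ b.toList <:+: nrep a.toList n) :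
    ∀ (xs : List Int) (t : Nat), checkLoop b xs (nrep a.toList t) = -1 := by
  intro xs
  induction xs with
  | nil => intro t; simp [checkLoop]
  | cons x xs ih =>
    intro t
    have hfalse : PySem.Chars.isIn b.toList (nrep a.toList t ++ nrep a.toList t) = false := by
      rw [PySem.Chars.isIn_eq_false_iff, nrep_double]; exact hnone _
    simp only [checkLoop, hfalse, Bool.false_eq_true, if_false]
    rw [nrep_double]; exact ih (2 * t)

theorem findRep_never {a b : String} (hnone : ∀ n, ¬ b.toList <:+: nrep a.toList n) :
    ∀ (ms : List Int), findRep a b ms = none := by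
  intro ms
  induction ms with
  | nil => rfl
  | cons m ms ih =>
    have hfalse : PySem.Chars.isIn b.toList (PySem.List.pyRepeat a.toList m) = false := by
      rw [PySem.Chars.isIn_eq_false_iff]; exact hnone m.toNat
    simp only [findRep, hfalse, Bool.false_eq_true, if_false]; exact ih

-- A's loop in the "found" case: m0 = minimal number of copies containing b, k = ⌈log2 m0⌉
theorem checkLoop_found {a b : String} {m0 k : Nat}
    (hm : ∀ n, b.toList <:+: nrep a.toList n ↔ m0 ≤ n)
    (hk1 : m0 ≤ 2 ^ k) (hk2 : ∀ j, m0 ≤ 2 ^ j → k ≤ j) :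
    ∀ (fuel : Nat) (x r : Int), (r - x).toNat = fuel → 0 ≤ x → 2 ^ x.toNat < m0 →
      checkLoop b (PySem.List.pyRange x r 1) (nrep a.toList (2 ^ x.toNat)) =
        if (k : Int) ≤ r then (k : Int) else -1 := by
  intro fuel
  induction fuel with
  | zero =>
    intro x r hfuel hx hlt
    have hrx : r ≤ x := by omega
    have hxk : x.toNat < k := by
      by_contra hcon
      exact absurd (Nat.pow_le_pow_right (by norm_num) (by omega) : 2 ^ k ≤ 2 ^ x.toNat) (by omega)
    rw [PySem.List.pyRange_one_eq_nil hrx]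
    have : ¬ (k : Int) ≤ r := by omega
    simp [checkLoop, this]
  | succ fuel ih =>
    intro x r hfuel hx hlt
    have hxr : x < r := by omega
    rw [PySem.List.pyRange_one_cons hxr]
    by_cases hhit : m0 ≤ 2 ^ (x.toNat + 1)
    · have htrue : PySem.Chars.isIn b.toList (nrep a.toList (2 ^ x.toNat) ++ nrep a.toList (2 ^ x.toNat)) = true := by
        rw [PySem.Chars.isIn_iff_infix, nrep_double, ← Nat.pow_succ']
        exact (hm _).mpr hhit
      simp only [checkLoop, htrue, if_true]
      have hk_eq : k = x.toNat + 1 := by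
        have h1 : k ≤ x.toNat + 1 := hk2 _ hhit
        have h2 : x.toNat < k := by
          by_contra hcon
          exact absurd (Nat.pow_le_pow_right (by norm_num) (by omega) : 2 ^ k ≤ 2 ^ x.toNat) (by omega)
        omega
      have : (k : Int) ≤ r := by omega
      simp [this]; omega
    · have hfalse : PySem.Chars.isIn b.toList (nrep a.toList (2 ^ x.toNat) ++ nrep a.toList (2 ^ x.toNat)) = false := by
        rw [PySem.Chars.isIn_eq_false_iff, nrep_double, ← Nat.pow_succ']
        intro hcon; exact hhit ((hm _).mp hcon)
      simp only [checkLoop, hfalse, Bool.false_eq_true, if_false]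
      rw [nrep_double, ← Nat.pow_succ', Nat.succ_eq_add_one]
      have hxt : (x + 1).toNat = x.toNat + 1 := by omega
      rw [← hxt]
      exact ih (x + 1) r (by omega) (by omega) (by rw [hxt]; omega)

theorem findRep_found {a b : String} {m0 : Nat}
    (hm : ∀ n, b.toList <:+: nrep a.toList n ↔ m0 ≤ n) :
    ∀ (fuel : Nat) (lo hi : Int), ((m0 : Int) - lo).toNat = fuel → 0 ≤ lo → lo ≤ (m0 : Int) →
      (m0 : Int) < hi → findRep a b (PySem.List.pyRange lo hi 1) = some (m0 : Int) := by
  intro fuel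
  induction fuel with
  | zero =>
    intro lo hi hfuel h0 hlo hhi
    have hlo' : lo = (m0 : Int) := by omega
    subst hlo'
    rw [PySem.List.pyRange_one_cons hhi]
    have htrue : PySem.Chars.isIn b.toList (PySem.List.pyRepeat a.toList (m0 : Int)) = true := by
      rw [PySem.Chars.isIn_iff_infix]
      exact (hm (Int.toNat (m0 : Int))).mpr (by omega)
    simp [findRep, htrue]
  | succ fuel ih =>
    intro lo hi hfuel h0 hlo hhi
    have hlt : lo < (m0 : Int) := by omega
    rw [PySem.List.pyRange_one_cons (by omega)]
    have hfalse : PySem.Chars.isIn b.toList (PySem.List.pyRepeat a.toList lo) = false := by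
      rw [PySem.Chars.isIn_eq_false_iff]
      intro hcon
      have := (hm lo.toNat).mp hcon
      omega
    simp only [findRep, hfalse, Bool.false_eq_true, if_false]
    exact ih (lo + 1) hi (by omega) (by omega) (by omega) hhi

-- ===== VERDICT (by name: the statement is the Claim_ definition above) =====
theorem check_spec : Claim_equal_check := by
  intro a b r _
  unfold Spec_check check check_alt
  by_cases h0 : PySem.Str.isIn b a = true
  · simp only [PySem.Str.isIn] at h0; simp [h0]
  · rw [Bool.not_eq_true] at h0
    simp only [h0, Bool.false_eq_true, if_false]
    have hS1 : ¬ b.toList <:+: nrep a.toList 1 := by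
      rw [nrep_one]
      exact (PySem.Chars.isIn_eq_false_iff _ _).mp h0
    by_cases hnone : ∀ n, ¬ b.toList <:+: nrep a.toList n
    · -- b is never contained: both return -1
      rw [findRep_never hnone]
      have := checkLoop_never hnone (PySem.List.pyRange 0 r 1) 1
      rw [nrep_one] at this
      rw [this]
      by_cases hA : PySem.Str.len a = 0 <;> simp only [hA, if_true, if_false] <;> rfl
    · -- b is contained in some number of copies
      push_neg at hnone
      have hA : a.toList ≠ [] := by
        rintro hnil
        obtain ⟨n, hn⟩ := hnone
        have : b.toList <:+: [] := by
          have : nrep a.toList n = [] := by simp [nrep, hnil]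
          rwa [this] at hn
        exact hS1 (by rw [nrep_one, hnil]; exact this)
      have hAlen : ¬ PySem.Str.len a = 0 := by
        simp only [PySem.Str.len_eq]
        intro hcon
        exact hA (List.length_eq_zero_iff.mp (by exact_mod_cast hcon))
      simp only [hAlen, if_false]
      -- minimal number of copies
      have hex : ∃ n, b.toList <:+: nrep a.toList n := hnone
      set m0 : Nat := Nat.find hex with hm0
      have hfind := Nat.find_spec hex
      have hm : ∀ n, b.toList <:+: nrep a.toList n ↔ m0 ≤ n := by
        intro n
        constructor
        · intro h; exact Nat.find_le h
        · intro h; exact nrep_mono h hfind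
      have hS0 : ¬ b.toList <:+: nrep a.toList 0 := by
        intro hcon
        exact hS1 (nrep_mono (by omega) hcon)
      have hm2 : 2 ≤ m0 := by
        have hne0 : m0 ≠ 0 := fun h => hS0 (h ▸ hfind)
        have hne1 : m0 ≠ 1 := fun h => hS1 (h ▸ hfind)
        omega
      -- the scan bound covers m0
      have hbound : m0 ≤ b.toList.length / a.toList.length + 2 :=
        (hm _).mp (occ_bound hA hfind)
      -- evaluate copies
      have hcopies : PySem.Int.floordiv (PySem.Str.len b) (PySem.Str.len a) + 2 =
          ((b.toList.length / a.toList.length + 2 : Nat) : Int) := by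
        simp [PySem.Str.len_eq, PySem.Int.floordiv_natCast]
      rw [hcopies, findRep_found hm ((m0 : Int) - 2).toNat 2 _ rfl (by omega) (by omega)
        (by push_cast; omega)]
      -- bit_length facts
      set k : Nat := PySem.Int.bitLength ((m0 : Int) - 1) with hkdef
      have hnat : ((m0 : Int) - 1).natAbs = m0 - 1 := by omega
      have hk1 : m0 ≤ 2 ^ k := by
        have h := PySem.Int.lt_two_pow_bitLength ((m0 : Int) - 1)
        rw [hnat, ← hkdef] at h; omega
      have hk2 : ∀ j, m0 ≤ 2 ^ j → k ≤ j := by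
        intro j hj
        have hne : (m0 : Int) - 1 ≠ 0 := by omega
        have hle := PySem.Int.two_pow_bitLength_le ((m0 : Int) - 1) hne
        rw [hnat, ← hkdef] at hle
        by_contra hcon
        have hjk : j ≤ k - 1 := by omega
        have hpow : (2 : Nat) ^ j ≤ 2 ^ (k - 1) := Nat.pow_le_pow_right (by norm_num) hjk
        omega
      have hloop := checkLoop_found hm hk1 hk2 r.toNat 0 r (by omega) le_rfl
        (by simpa using hm2)
      simp only [Int.toNat_zero, pow_zero, nrep_one] at hloop
      rw [hloop]
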